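-- pv_equiv track=rewrite | github.com/shintaro1993/atcoder | problem011-020/017_a.py | check
-- ===== SOURCE A (Python) =====
-- def check(s):
--     i = 0
--     n = len(s)
--     while i < n:
--         if i < n-1 and s[i] == 'c' and s[i+1] == 'h':
--             i += 2
--             continue
--         if s[i] in "oku":
--             i += 1
--             continue
--         return False
--     return True
-- ===== SOURCE B (Python) =====
-- def check(s):
--     # Delete every 'ch' token, then every remaining character must be o/k/u.
--     return all(c in 'oku' for c in s.replace('ch', ''))
-- ===== Notes on version B (the rewrite author's own statement) =====
-- stated objective: simpler
-- what changed: Replaces the manual index-walk scanner with a transform pass (delete all 'ch' via str.replace) followed by a single membership scan over the remainder.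
import Mathlib
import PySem

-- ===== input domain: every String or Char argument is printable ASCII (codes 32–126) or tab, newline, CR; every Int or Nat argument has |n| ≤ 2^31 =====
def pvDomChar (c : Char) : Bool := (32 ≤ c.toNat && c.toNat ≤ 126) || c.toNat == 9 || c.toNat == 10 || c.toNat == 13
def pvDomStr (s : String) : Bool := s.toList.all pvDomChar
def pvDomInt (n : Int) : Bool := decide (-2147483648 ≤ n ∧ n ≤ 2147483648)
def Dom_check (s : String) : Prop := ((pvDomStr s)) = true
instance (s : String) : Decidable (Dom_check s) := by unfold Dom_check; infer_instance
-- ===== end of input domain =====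

-- B replaces A's manual index-walk scanner with a transform pass (delete every 'ch'
-- via str.replace) followed by a single membership scan; objective: simpler.


-- ===== PORT A =====
-- A's while loop over the index i, step 1 or 2, as structural recursion on the
-- remaining suffix of characters.  Branches in A's order: the two-char 'ch' test
-- (which needs i < n-1, i.e. at least two chars left) first, then the single-char
-- test.  `s[i] in "oku"` for a single character is exactly the equality disjunction.
def checkGo : List Char → Bool
  | [] => true
  | a :: b :: t =>
    if a == 'c' && b == 'h' then checkGo t
    else if a == 'o' || a == 'k' || a == 'u' then checkGo (b :: t)
    else false
  | [a] =>
    if a == 'o' || a == 'k' || a == 'u' then checkGo []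
    else false

def check (s : String) : Bool := checkGo s.toList

-- ===== PORT B =====
-- `c in 'oku'` for a single character c is exactly the equality disjunction (exact).
def okuChar (c : Char) : Bool := c == 'o' || c == 'k' || c == 'u'

def check_alt (s : String) : Bool :=
  (PySem.Str.replace s "ch" "").toList.all okuChar

-- ===== PRECONDITION & SPEC =====
def Spec_check (s : String) (out : Bool) : Prop := out = check_alt s
instance (s : String) (out : Bool) : Decidable (Spec_check s out) := by unfold Spec_check; infer_instance

-- ===== CLAIM (what is proved, stated in full; the proofs are below) =====
def Claim_equal_check : Prop := ∀ (s : String), Dom_check s → Spec_check s (check s)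

-- ===== LEMMAS AND PROOFS =====

-- What deleting every left-to-right occurrence of "ch" computes, in direct recursion.
def repCH : List Char → List Char
  | [] => []
  | a :: b :: t => if a == 'c' && b == 'h' then repCH t else a :: repCH (b :: t)
  | [a] => [a]

lemma go_spec (fuel : Nat) : ∀ (l acc : List Char), l.length ≤ fuel →
    PySem.Chars.replace.go ['c', 'h'] [] fuel l acc = acc.reverse ++ repCH l := by
  induction fuel with
  | zero =>
    intro l acc h
    have : l = [] := List.eq_nil_of_length_eq_zero (Nat.le_zero.mp h)
    subst this
    simp [PySem.Chars.replace.go, repCH]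
  | succ n ih =>
    intro l acc h
    match l with
    | [] => simp [PySem.Chars.replace.go, repCH]
    | [a] =>
      have hpre : (['c', 'h'].isPrefixOf [a]) = false := by
        simp [List.isPrefixOf]
      simp only [PySem.Chars.replace.go, hpre, Bool.false_eq_true, if_false]
      rw [ih [] (a :: acc) (by simp)]
      simp [repCH]
    | a :: b :: t =>
      by_cases ha : a = 'c'
      · subst ha
        by_cases hb : b = 'h'
        · subst hb
          have hpre : (['c', 'h'].isPrefixOf ('c' :: 'h' :: t)) = true := by
            simp [List.isPrefixOf]
          simp only [PySem.Chars.replace.go, hpre, if_true, List.reverse_nil,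
            List.nil_append]
          rw [show List.drop ['c','h'].length ('c' :: 'h' :: t) = t from rfl]
          rw [ih t acc (by simp at h ⊢; omega)]
          simp [repCH]
        · have hpre : (['c', 'h'].isPrefixOf ('c' :: b :: t)) = false := by
            simp [List.isPrefixOf]
            intro hcontra
            exact absurd hcontra.symm hb
          simp only [PySem.Chars.replace.go, hpre, Bool.false_eq_true, if_false]
          rw [ih (b :: t) ('c' :: acc) (by simp at h ⊢; omega)]
          simp [repCH, hb]
      · have hpre : (['c', 'h'].isPrefixOf (a :: b :: t)) = false := by
          simp [List.isPrefixOf]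
          intro hcontra
          exact absurd hcontra.symm ha
        simp only [PySem.Chars.replace.go, hpre, Bool.false_eq_true, if_false]
        rw [ih (b :: t) (a :: acc) (by simp at h ⊢; omega)]
        simp [repCH, ha]

lemma replace_eq_repCH (cs : List Char) :
    PySem.Chars.replace cs ['c', 'h'] [] = repCH cs := by
  rw [PySem.Chars.replace]
  simp only [List.isEmpty, Bool.false_eq_true, if_false]
  exact go_spec cs.length cs [] (le_refl _)

lemma checkGo_eq_all : ∀ (cs : List Char), checkGo cs = (repCH cs).all okuChar
  | [] => by simp [checkGo, repCH]
  | [a] => by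
      by_cases hok : (a == 'o' || a == 'k' || a == 'u') = true
      · simp [checkGo, repCH, okuChar, hok]
      · simp at hok
        simp [checkGo, repCH, okuChar, hok]
  | a :: b :: t => by
      have ih1 := checkGo_eq_all t
      have ih2 := checkGo_eq_all (b :: t)
      by_cases hab : a = 'c' ∧ b = 'h'
      · obtain ⟨h1, h2⟩ := hab; subst h1; subst h2
        simp [checkGo, repCH, ih1]
      · have hb : (a == 'c' && b == 'h') = false := by
          rcases Decidable.em (a = 'c') with h | h
          · have h2 : ¬ b = 'h' := fun hb => hab ⟨h, hb⟩
            simp [h, h2]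
          · simp [h]
        simp only [checkGo, hb, Bool.false_eq_true, if_false, repCH]
        by_cases hok : (a == 'o' || a == 'k' || a == 'u') = true
        · simp [hok, ih2, okuChar]
        · simp at hok
          simp [hok, okuChar]

-- ===== VERDICT (by name: the statement is the Claim_ definition above) =====
theorem check_spec : Claim_equal_check := by
  intro s _
  unfold Spec_check check check_alt
  rw [PySem.Str.toList_replace]
  have h2 : "ch".toList = ['c', 'h'] := rfl
  have h3 : "".toList = ([] : List Char) := rfl
  rw [h2, h3, replace_eq_repCH, checkGo_eq_all]
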